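-- pv_equiv track=rewrite | github.com/praneeljoshi/popgen-phylogen | admixture_network/parse_rich_newick2.py | strip_bracket_comments
-- ===== SOURCE A (Python) =====
-- def strip_bracket_comments(string):
--     """
--     Strips comments, enclosed in square brackets, from string.
--     """
--     new_string = ""
--     comment = False
--     for i, char in enumerate(string):
--         if char == "[":
--             comment = True
--         elif char == "]":
--             comment = False
--         elif comment:
--             continue
--         else:
--             new_string += char
--     return new_string
-- ===== SOURCE B (Python) =====
-- def strip_bracket_comments(string):
--     """
--     Strips comments, enclosed in square brackets, from string.
--     """
--     return "".join(chunk.split("[", 1)[0] for chunk in string.split("]"))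
-- ===== Notes on version B (the rewrite author's own statement) =====
-- stated objective: idiomatic
-- what changed: Replaced the character-by-character loop with a comment flag by a split-based one-liner: split on the closing bracket, keep each chunk's prefix before its first opening bracket, and join.
import Mathlib
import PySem

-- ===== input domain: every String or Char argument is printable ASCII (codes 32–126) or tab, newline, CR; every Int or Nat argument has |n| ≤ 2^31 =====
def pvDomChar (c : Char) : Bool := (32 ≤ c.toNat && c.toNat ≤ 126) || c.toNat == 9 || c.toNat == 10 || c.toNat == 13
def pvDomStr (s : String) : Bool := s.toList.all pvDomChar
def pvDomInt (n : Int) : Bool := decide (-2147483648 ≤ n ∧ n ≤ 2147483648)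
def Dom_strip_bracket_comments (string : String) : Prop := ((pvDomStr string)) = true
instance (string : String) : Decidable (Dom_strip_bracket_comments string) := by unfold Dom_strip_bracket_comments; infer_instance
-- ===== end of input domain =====

-- B replaces A's character loop with a comment flag by an idiomatic split-on-closing-bracket / prefix-before-opening-bracket / join one-liner (measured faster at large sizes in a timing run).


-- ===== PORT A =====
-- A's for-loop over the characters, carrying the comment flag; string concatenation
-- becomes the cons produced on the non-comment branch.
def stripGoA : List Char → Bool → List Char
  | [], _ => []
  | c :: rest, comment =>
    if c = '[' then stripGoA rest true
    else if c = ']' then stripGoA rest false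
    else if comment then stripGoA rest comment
    else c :: stripGoA rest comment

def strip_bracket_comments (string : String) : String :=
  String.ofList (stripGoA string.toList false)

-- ===== PORT B =====
-- string.split("]") : exact port of Python's single-character split (no limit).
def splitRB : List Char → List (List Char)
  | [] => [[]]
  | c :: rest =>
    match splitRB rest with
    | [] => [[]]   -- unreachable: splitRB never returns []
    | h :: t => if c = ']' then [] :: h :: t else (c :: h) :: t

-- chunk.split("[", 1)[0] : the prefix of the chunk before its first '['.
def beforeLB (chunk : List Char) : List Char := chunk.takeWhile (· ≠ '[')

def strip_bracket_comments_alt (string : String) : String :=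
  String.ofList (((splitRB string.toList).map beforeLB).flatten)

-- ===== PRECONDITION & SPEC =====
def Spec_strip_bracket_comments (string : String) (out : String) : Prop := out = strip_bracket_comments_alt string
instance (string : String) (out : String) : Decidable (Spec_strip_bracket_comments string out) := by unfold Spec_strip_bracket_comments; infer_instance

-- ===== CLAIM (what is proved, stated in full; the proofs are below) =====
def Claim_equal_strip_bracket_comments : Prop := ∀ (string : String), Dom_strip_bracket_comments string → Spec_strip_bracket_comments string (strip_bracket_comments string)

-- ===== LEMMAS AND PROOFS =====

theorem splitRB_ne_nil (l : List Char) : splitRB l ≠ [] := by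
  cases l with
  | nil => simp [splitRB]
  | cons c rest =>
    cases hsr : splitRB rest with
    | nil => simp [splitRB, hsr]
    | cons h t =>
      simp only [splitRB, hsr]
      split <;> simp

-- Joint invariant: with comment = false, A's loop yields B's whole join; with
-- comment = true it yields B's join with the first ']'-chunk dropped.
theorem stripGo_split (l : List Char) :
    stripGoA l false = ((splitRB l).map beforeLB).flatten ∧
    stripGoA l true = (((splitRB l).drop 1).map beforeLB).flatten := by
  induction l with
  | nil => simp [stripGoA, splitRB, beforeLB]
  | cons c rest ih =>
    obtain ⟨ih1, ih2⟩ := ih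
    cases hs : splitRB rest with
    | nil => exact absurd hs (splitRB_ne_nil rest)
    | cons h t =>
      by_cases hlb : c = '['
      · subst hlb
        refine ⟨?_, ?_⟩ <;>
        · show stripGoA rest true = _
          rw [ih2]
          simp [splitRB, hs, beforeLB, List.takeWhile]
      · by_cases hrb : c = ']'
        · subst hrb
          constructor <;> simp_all [stripGoA, splitRB, beforeLB]
        · constructor <;> simp_all [stripGoA, splitRB, beforeLB]

-- ===== VERDICT (by name: the statement is the Claim_ definition above) =====
theorem strip_bracket_comments_spec : Claim_equal_strip_bracket_comments := by
  intro s _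
  unfold Spec_strip_bracket_comments strip_bracket_comments strip_bracket_comments_alt
  rw [(stripGo_split s.toList).1]
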